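-- pv_equiv track=rewrite | github.com/pypi-data/pypi-mirror-357 | packages/evocloud-sdk/evocloud_sdk-0.1.0-py3-none-any.whl/linkpay/webhook.py | parse_webhook_headers
-- ===== SOURCE A (Python) =====
-- from typing import Dict, Any, Optional, Callable, Union
--
-- def parse_webhook_headers(headers: Dict[str, str]) -> Dict[str, str]:
--     """
--     解析 Webhook 请求头
--
--     Args:
--         headers: HTTP 请求头字典
--
--     Returns:
--         Dict[str, str]: 解析后的 Webhook 相关头信息
--     """
--     webhook_headers = {}
--
--     # 常见的 Webhook 头字段
--     header_mappings = {
--         'x-evo-signature': 'signature',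
--         'x-evo-timestamp': 'timestamp',
--         'x-evo-event-type': 'event_type',
--         'x-evo-event-id': 'event_id',
--         'content-type': 'content_type'
--     }
--
--     for header_key, mapped_key in header_mappings.items():
--         # 支持大小写不敏感的头字段查找
--         for key, value in headers.items():
--             if key.lower() == header_key.lower():
--                 webhook_headers[mapped_key] = value
--                 break
--
--     return webhook_headers
-- ===== SOURCE B (Python) =====
-- def parse_webhook_headers(headers):
--     """Case-insensitive header mapping via a one-pass lowercased index."""
--     index = {}
--     for key, value in headers.items():
--         lk = key.lower()
--         if lk not in index:
--             index[lk] = value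
--     header_mappings = {
--         'x-evo-signature': 'signature',
--         'x-evo-timestamp': 'timestamp',
--         'x-evo-event-type': 'event_type',
--         'x-evo-event-id': 'event_id',
--         'content-type': 'content_type'
--     }
--     webhook_headers = {}
--     for header_key, mapped_key in header_mappings.items():
--         lk = header_key.lower()
--         if lk in index:
--             webhook_headers[mapped_key] = index[lk]
--     return webhook_headers
-- ===== Notes on version B (the rewrite author's own statement) =====
-- stated objective: alternative
-- what changed: Replaces the nested scan (for each of the 5 mappings, rescan all headers for a case-insensitive match) with one pass that builds a lowercased first-occurrence index, then 5 direct dict lookups.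
import Mathlib
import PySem

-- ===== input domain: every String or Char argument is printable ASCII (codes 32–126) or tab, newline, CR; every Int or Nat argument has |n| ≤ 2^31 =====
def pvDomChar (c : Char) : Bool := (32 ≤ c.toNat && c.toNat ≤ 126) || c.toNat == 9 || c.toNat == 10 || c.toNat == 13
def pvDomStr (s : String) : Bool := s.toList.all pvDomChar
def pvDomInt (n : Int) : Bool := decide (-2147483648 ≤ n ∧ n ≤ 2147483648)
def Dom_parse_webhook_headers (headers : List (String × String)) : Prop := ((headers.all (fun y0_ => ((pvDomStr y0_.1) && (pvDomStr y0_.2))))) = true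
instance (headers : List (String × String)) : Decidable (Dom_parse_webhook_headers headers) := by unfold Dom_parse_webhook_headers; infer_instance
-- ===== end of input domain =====

-- B replaces A's per-mapping rescan of the headers with one lowercased first-occurrence
-- index built in a single pass, then five direct lookups (an alternative structure, same value).

-- ===== PORT A =====
-- the literal header_mappings dict of A (and B), as its items list
def pvHeaderMappings : List (String × String) :=
  [("x-evo-signature", "signature"), ("x-evo-timestamp", "timestamp"),
   ("x-evo-event-type", "event_type"), ("x-evo-event-id", "event_id"),
   ("content-type", "content_type")]

-- A's inner loop: scan headers for the first case-insensitive match of hk, break on it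
def pvInnerA (hk mk : String) : List (String × String) → PySem.Dict String String → PySem.Dict String String
  | [], wh => wh
  | (k, v) :: rest, wh =>
      if PySem.Str.lower k == PySem.Str.lower hk then wh.insert mk v
      else pvInnerA hk mk rest wh

def parse_webhook_headers (headers : List (String × String)) : List (String × String) :=
  (pvHeaderMappings.foldl (fun wh p => pvInnerA p.1 p.2 headers wh) PySem.Dict.empty).items

-- ===== PORT B =====
-- B's first loop: build the lowercased index, keeping only the first occurrence of each key
def pvBuildIndex : List (String × String) → PySem.Dict String String → PySem.Dict String String
  | [], d => d
  | (k, v) :: rest, d =>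
      pvBuildIndex rest
        (if d.contains (PySem.Str.lower k) then d else d.insert (PySem.Str.lower k) v)

def parse_webhook_headers_alt (headers : List (String × String)) : List (String × String) :=
  let idx := pvBuildIndex headers PySem.Dict.empty
  (pvHeaderMappings.foldl
    (fun wh p =>
      match idx.get? (PySem.Str.lower p.1) with
      | some v => wh.insert p.2 v
      | none => wh) PySem.Dict.empty).items

-- ===== PRECONDITION & SPEC =====
def Spec_parse_webhook_headers (headers : List (String × String)) (out : List (String × String)) : Prop := out = parse_webhook_headers_alt headers
instance (headers : List (String × String)) (out : List (String × String)) : Decidable (Spec_parse_webhook_headers headers out) := by unfold Spec_parse_webhook_headers; infer_instance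

-- ===== CLAIM (what is proved, stated in full; the proofs are below) =====
def Claim_equal_parse_webhook_headers : Prop := ∀ (headers : List (String × String)), Dom_parse_webhook_headers headers → Spec_parse_webhook_headers headers (parse_webhook_headers headers)

-- ===== LEMMAS AND PROOFS =====

-- the index only ever inserts absent keys, so an existing binding survives
theorem pvBuildIndex_preserve (hs : List (String × String)) (d : PySem.Dict String String)
    (L : String) (v : String) (h : d.get? L = some v) :
    (pvBuildIndex hs d).get? L = some v := by
  induction hs generalizing d with
  | nil => simpa [pvBuildIndex] using h
  | cons p rest ih =>
      obtain ⟨k, w⟩ := p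
      simp only [pvBuildIndex]
      by_cases hc : d.contains (PySem.Str.lower k)
      · rw [if_pos hc]; exact ih _ h
      · rw [if_neg hc]
        apply ih
        by_cases hkL : L = PySem.Str.lower k
        · subst hkL
          simp only [Bool.not_eq_true] at hc
          rw [← PySem.Dict.get?_eq_none_iff_contains] at hc
          rw [h] at hc
          cases hc
        · rw [PySem.Dict.get?_insert, if_neg hkL]; exact h

-- A's inner scan for hk equals a lookup of lower hk in the index, for any seed d
-- not yet containing lower hk
theorem pvInner_eq (hk mk : String) (hs : List (String × String))
    (d wh : PySem.Dict String String) (h : d.get? (PySem.Str.lower hk) = none) :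
    pvInnerA hk mk hs wh =
      (match (pvBuildIndex hs d).get? (PySem.Str.lower hk) with
       | some v => wh.insert mk v
       | none => wh) := by
  induction hs generalizing d with
  | nil => simp [pvInnerA, pvBuildIndex, h]
  | cons p rest ih =>
      obtain ⟨k, v⟩ := p
      simp only [pvInnerA, pvBuildIndex]
      by_cases heq : PySem.Str.lower k = PySem.Str.lower hk
      · have hc : d.contains (PySem.Str.lower k) = false := by
          rw [heq, ← PySem.Dict.get?_eq_none_iff_contains]; exact h
        rw [if_pos (by simp [heq]), if_neg (by simp [hc])]
        have hkey : (pvBuildIndex rest (d.insert (PySem.Str.lower k) v)).get? (PySem.Str.lower hk)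
            = some v := by
          apply pvBuildIndex_preserve
          rw [heq, PySem.Dict.get?_insert, if_pos rfl]
        rw [hkey]
      · rw [if_neg (by simp [heq])]
        have hne : PySem.Str.lower hk ≠ PySem.Str.lower k := fun hx => heq hx.symm
        by_cases hc : d.contains (PySem.Str.lower k)
        · rw [if_pos hc]; exact ih _ h
        · rw [if_neg hc]
          exact ih _ (by rw [PySem.Dict.get?_insert, if_neg hne]; exact h)

-- specialisation to the empty seed, in simp-rewrite form
theorem pvInner_eq_empty (hk mk : String) (hs : List (String × String))
    (wh : PySem.Dict String String) :
    pvInnerA hk mk hs wh =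
      (match (pvBuildIndex hs PySem.Dict.empty).get? (PySem.Str.lower hk) with
       | some v => wh.insert mk v
       | none => wh) :=
  pvInner_eq hk mk hs PySem.Dict.empty wh (by simp)

-- ===== VERDICT (by name: the statement is the Claim_ definition above) =====
theorem parse_webhook_headers_spec : Claim_equal_parse_webhook_headers := by
  intro headers _
  unfold Spec_parse_webhook_headers parse_webhook_headers parse_webhook_headers_alt
  simp only [pvHeaderMappings, List.foldl, pvInner_eq_empty]
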